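-- pv_equiv track=rewrite | github.com/MSKose/Codewars | 6 kyu/Minimum difference in duplicate characters.py | min_repeating_character_difference
-- ===== SOURCE A (Python) =====
-- def min_repeating_character_difference(text):
--     repetion_dictionary = {}
--     res_min = (float('inf'), text[0])
--
--     for idx, c in enumerate(text):
--         if c in repetion_dictionary:
--             idx_difference = idx - repetion_dictionary[c]
--             res_min = (idx_difference, c) if idx_difference < res_min[0] else res_min
--         repetion_dictionary[c] = idx
--
--     return res_min if len(repetion_dictionary) != len(text) else None
-- ===== SOURCE B (Python) =====
-- def min_repeating_character_difference(text):
--     # Brute force by increasing pair distance: the first distance d at which some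
--     # position i has text[i] == text[i + d], taking the smallest such i, gives the
--     # minimal gap and A's (gap, later-index) tie-break.
--     n = len(text)
--     for d in range(1, n):
--         for i in range(n - d):
--             if text[i] == text[i + d]:
--                 return (d, text[i])
--     return None
-- ===== Notes on version B (the rewrite author's own statement) =====
-- stated objective: faster
-- what changed: Replaces the last-occurrence dictionary scan with a running minimum by a brute-force search over pair distances in increasing order that returns at the first position matching its partner, so it stops as soon as the minimal gap is found instead of always scanning the whole string.
import Mathlib
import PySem

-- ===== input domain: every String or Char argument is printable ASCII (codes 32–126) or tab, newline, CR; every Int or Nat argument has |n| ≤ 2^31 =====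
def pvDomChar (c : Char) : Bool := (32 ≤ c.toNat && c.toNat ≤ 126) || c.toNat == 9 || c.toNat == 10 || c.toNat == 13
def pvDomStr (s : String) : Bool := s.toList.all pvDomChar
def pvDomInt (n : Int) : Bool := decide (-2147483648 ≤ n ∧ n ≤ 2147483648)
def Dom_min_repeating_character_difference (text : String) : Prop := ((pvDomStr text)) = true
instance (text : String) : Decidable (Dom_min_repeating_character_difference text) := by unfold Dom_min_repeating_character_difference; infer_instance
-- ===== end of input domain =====

-- B replaces A's last-occurrence-dictionary scan by a brute-force search over pair
-- distances in increasing order, returning at the first match (measured faster by the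
-- timing run via its early exit); on the empty string A raises IndexError while B
-- returns None, so Pre_ excludes it.


-- ===== PORT A =====
-- Loop body of A: state = (repetion_dictionary, res_min).  res_min's initial value
-- (float('inf'), text[0]) is modelled as `none` (infinity is beaten by any duplicate
-- gap, so the initial tuple is never returned); the possible IndexError of text[0]
-- is the outer match in the port below.
def pvAStep (st : PySem.Dict Char Int × Option (Int × String)) (p : Int × Char) :
    PySem.Dict Char Int × Option (Int × String) :=
  let rm' :=
    match PySem.Dict.get? st.1 p.2 with
    | some prev =>
      let diff := p.1 - prev
      match st.2 with
      | none => some (diff, String.ofList [p.2])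
      | some r => if diff < r.1 then some (diff, String.ofList [p.2]) else some r
    | none => st.2
  (PySem.Dict.insert st.1 p.2 p.1, rm')

def min_repeating_character_difference (text : String) : Option (Int × String) :=
  match PySem.Str.pyGet? text 0 with          -- res_min = (float('inf'), text[0]): IndexError on ""
  | none => none
  | some _ =>
    let st := (PySem.List.enumerate text.toList 0).foldl pvAStep (PySem.Dict.empty, none)
    if (PySem.Dict.keys st.1).length ≠ text.toList.length then st.2 else none

-- ===== PORT B =====
-- inner loop: for i in range(n - d): if text[i] == text[i + d]: return (d, text[i])
def pvAltInner (l : List Char) (d : Int) : List Int → Option (Int × String)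
  | [] => none
  | i :: rest =>
    match PySem.List.pyGet? l i with
    | some a =>
      if PySem.List.pyGet? l (i + d) = some a then some (d, String.ofList [a])
      else pvAltInner l d rest
    | none => pvAltInner l d rest

-- outer loop: for d in range(1, n): …
def pvAltOuter (l : List Char) : List Int → Option (Int × String)
  | [] => none
  | d :: rest =>
    match pvAltInner l d (PySem.List.pyRange 0 ((l.length : Int) - d) 1) with
    | some r => some r
    | none => pvAltOuter l rest

def min_repeating_character_difference_alt (text : String) : Option (Int × String) :=
  pvAltOuter text.toList (PySem.List.pyRange 1 (text.toList.length : Int) 1)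

-- ===== PRECONDITION & SPEC =====
-- Pre_ excludes only the empty string, on which A raises IndexError (text[0]).
def Pre_min_repeating_character_difference (text : String) : Prop := text.toList ≠ []
instance (text : String) : Decidable (Pre_min_repeating_character_difference text) := by
  unfold Pre_min_repeating_character_difference; infer_instance
def pvWitness_min_repeating_character_difference : String := "abcab"

def Spec_min_repeating_character_difference (text : String) (out : Option (Int × String)) : Prop := out = min_repeating_character_difference_alt text
instance (text : String) (out : Option (Int × String)) : Decidable (Spec_min_repeating_character_difference text out) := by unfold Spec_min_repeating_character_difference; infer_instance

-- ===== CLAIM (what is proved, stated in full; the proofs are below) =====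
def Claim_equal_min_repeating_character_difference : Prop := ∀ (text : String), Dom_min_repeating_character_difference text → Pre_min_repeating_character_difference text → Spec_min_repeating_character_difference text (min_repeating_character_difference text)

-- ===== LEMMAS AND PROOFS =====

-- dictionary part of A's fold
def pvDictAfter (dd : PySem.Dict Char Int) (ps : List (Int × Char)) : PySem.Dict Char Int :=
  ps.foldl (fun d p => PySem.Dict.insert d p.2 p.1) dd

-- the candidate triples (gap, later index, char) that A's loop feeds its running minimum
def pvCands (dd : PySem.Dict Char Int) : List (Int × Char) → List (Int × Int × Char)
  | [] => []
  | p :: ps =>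
    (match PySem.Dict.get? dd p.2 with
     | some prev => [(p.1 - prev, p.1, p.2)]
     | none => []) ++ pvCands (PySem.Dict.insert dd p.2 p.1) ps

-- A's running-minimum update, on candidate triples
def pvOp (rm : Option (Int × String)) (t : Int × Int × Char) : Option (Int × String) :=
  match rm with
  | none => some (t.1, String.ofList [t.2.2])
  | some r => if t.1 < r.1 then some (t.1, String.ofList [t.2.2]) else some r

-- one probe of B's inner loop, Nat-indexed
def pvGN (l : List Char) (d i : Nat) : Option (Int × String) :=
  match l[i]? with
  | some a => if l[i + d]? = some a then some ((d : Int), String.ofList [a]) else none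
  | none => none

-- "some position matches its partner at distance k+1"
def pvP (l : List Char) (k : Nat) : Prop :=
  ∃ i, i < l.length ∧ i + (k + 1) < l.length ∧ l[i]? = l[i + (k + 1)]?

-- consecutive duplicate pair (i, j) in l
def pvCons (l : List Char) (i j : Nat) : Prop :=
  i < j ∧ j < l.length ∧ l[i]? = l[j]? ∧ ∀ k, i < k → k < j → l[k]? ≠ l[j]?

-- dictionary dd holds, for each char, its last occurrence index before position s
def pvInvD (l : List Char) (dd : PySem.Dict Char Int) (s : Nat) : Prop :=
  ∀ c j, PySem.Dict.get? dd c = some j ↔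
    ∃ jn : Nat, j = (jn : Int) ∧ jn < s ∧ l[jn]? = some c ∧
      ∀ k, jn < k → k < s → l[k]? ≠ some c

theorem pv_fold_eq (ps : List (Int × Char)) (dd : PySem.Dict Char Int)
    (rm : Option (Int × String)) :
    ps.foldl pvAStep (dd, rm) = (pvDictAfter dd ps, (pvCands dd ps).foldl pvOp rm) := by
  induction ps generalizing dd rm with
  | nil => simp [pvDictAfter, pvCands]
  | cons p ps ih =>
    cases h : PySem.Dict.get? dd p.2 with
    | none =>
      simp only [List.foldl_cons, pvAStep, h]
      rw [ih]
      simp [pvDictAfter, pvCands, h]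
    | some prev =>
      simp only [List.foldl_cons, pvAStep, h]
      rw [ih]
      cases rm with
      | none => simp [pvDictAfter, pvCands, h, pvOp]
      | some r => simp [pvDictAfter, pvCands, h, pvOp]

theorem pv_count (ps : List (Int × Char)) (dd : PySem.Dict Char Int) (h : dd.keys.Nodup) :
    (pvDictAfter dd ps).keys.length + (pvCands dd ps).length = dd.keys.length + ps.length := by
  induction ps generalizing dd with
  | nil => simp [pvDictAfter, pvCands]
  | cons p ps ih =>
    have hnd : (PySem.Dict.insert dd p.2 p.1).keys.Nodup := PySem.Dict.nodup_keys_insert dd p.2 p.1 h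
    cases hc : PySem.Dict.get? dd p.2 with
    | none =>
      have hcon : dd.contains p.2 = false := by
        rw [PySem.Dict.contains_eq_isSome_get?, hc]; rfl
      have hk := PySem.Dict.keys_insert_of_not_contains dd p.1 hcon
      have := ih (PySem.Dict.insert dd p.2 p.1) hnd
      simp only [pvDictAfter, List.foldl_cons, pvCands, hc] at *
      simp only [List.nil_append]
      rw [this, hk]
      simp; omega
    | some prev =>
      have hcon : dd.contains p.2 = true := by
        rw [PySem.Dict.contains_eq_isSome_get?, hc]; rfl
      have hk := PySem.Dict.keys_insert_of_contains dd p.1 hcon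
      have := ih (PySem.Dict.insert dd p.2 p.1) hnd
      simp only [pvDictAfter, List.foldl_cons, pvCands, hc] at *
      simp only [List.singleton_append, List.length_cons]
      rw [hk] at this
      omega

theorem pv_invD_step (l : List Char) (s : Nat) (dd : PySem.Dict Char Int) (c : Char)
    (hc : l[s]? = some c) (hinv : pvInvD l dd s) :
    pvInvD l (PySem.Dict.insert dd c (s : Int)) (s + 1) := by
  intro c' j
  rw [PySem.Dict.get?_insert]
  by_cases hcc : c' = c
  · subst hcc
    rw [if_pos rfl]
    constructor
    · intro h
      have hj : (s : Int) = j := Option.some_inj.mp h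
      exact ⟨s, hj.symm, by omega, hc, fun k h1 h2 => by omega⟩
    · rintro ⟨jn, rfl, hlt, hj, hlast⟩
      have : jn = s := by
        by_contra hne
        exact hlast s (by omega) (by omega) hc
      rw [this]
  · rw [if_neg hcc, hinv c' j]
    constructor
    · rintro ⟨jn, rfl, hlt, hj, hlast⟩
      refine ⟨jn, rfl, by omega, hj, fun k h1 h2 => ?_⟩
      by_cases hks : k = s
      · subst hks; rw [hc]; intro h; exact hcc (Option.some_inj.mp h).symm
      · exact hlast k h1 (by omega)
    · rintro ⟨jn, rfl, hlt, hj, hlast⟩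
      have hjs : jn ≠ s := by
        intro h; subst h; rw [hc] at hj; exact hcc (Option.some_inj.mp hj).symm
      exact ⟨jn, rfl, by omega, hj, fun k h1 h2 => hlast k h1 (by omega)⟩

theorem pv_cands_mem (l : List Char) (ls : List Char) (s : Nat) (dd : PySem.Dict Char Int)
    (hls : ls = l.drop s) (hinv : pvInvD l dd s) (t : Int × Int × Char) :
    t ∈ pvCands dd (PySem.List.enumerate ls s) ↔
      ∃ i jn : Nat, s ≤ jn ∧ pvCons l i jn ∧
        l[jn]? = some t.2.2 ∧ t.1 = (jn : Int) - (i : Int) ∧ t.2.1 = (jn : Int) := by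
  induction ls generalizing s dd with
  | nil =>
    have hlen : l.length ≤ s := by
      have := List.drop_eq_nil_iff.mp hls.symm
      omega
    simp only [PySem.List.enumerate_nil, pvCands, List.not_mem_nil, false_iff]
    rintro ⟨i, jn, hsj, ⟨_, hjl, _, _⟩, _⟩
    omega
  | cons c rest ih =>
    have hcs : l[s]? = some c := by
      have h0 : (l.drop s)[0]? = some c := by rw [← hls]; rfl
      rw [List.getElem?_drop] at h0; simpa using h0
    have hrest : rest = l.drop (s + 1) := by
      have h : (l.drop s).tail = l.drop (s + 1) := List.tail_drop
      rw [← hls] at h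
      simpa using h
    have hinv' := pv_invD_step l s dd c hcs hinv
    rw [PySem.List.enumerate_cons]
    simp only [pvCands, List.mem_append]
    have hcast : ((s : Int) + 1) = (((s + 1 : Nat)) : Int) := by push_cast; ring
    rw [hcast, ih (s + 1) _ hrest hinv']
    constructor
    · rintro (hhead | ⟨i, jn, hsj, hcons, hch, h1, h2⟩)
      · -- head candidate: jn = s
        cases hd : PySem.Dict.get? dd c with
        | none => rw [hd] at hhead; simp at hhead
        | some prev =>
          rw [hd] at hhead
          simp only [List.mem_singleton] at hhead
          obtain ⟨i, rfl, hilt, hic, hlast⟩ := (hinv c prev).mp hd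
          refine ⟨i, s, le_refl s, ⟨hilt, ?_, by rw [hic, hcs], ?_⟩, ?_, ?_, ?_⟩
          · exact (List.getElem?_eq_some_iff.mp hcs).1
          · intro k hk1 hk2; rw [hcs]; exact hlast k hk1 hk2
          · rw [hhead]; exact hcs
          · rw [hhead]
          · rw [hhead]
      · exact ⟨i, jn, by omega, hcons, hch, h1, h2⟩
    · rintro ⟨i, jn, hsj, hcons, hch, h1, h2⟩
      rcases Nat.eq_or_lt_of_le hsj with hjs | hjs
      · -- jn = s : this is the head candidate
        left
        obtain ⟨hij, hjl, hichar, hlast⟩ := hcons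
        subst hjs
        -- dd.get? c = some i by the invariant
        have hichar' : l[i]? = some c := by rw [hichar]; exact hcs
        have hd : PySem.Dict.get? dd c = some (i : Int) :=
          (hinv c (i : Int)).mpr ⟨i, rfl, hij, hichar', fun k hk1 hk2 => by
            have := hlast k hk1 hk2; rw [hcs] at this; exact this⟩
        rw [hd]
        have ht22 : t.2.2 = c := by rw [hcs] at hch; exact (Option.some_inj.mp hch).symm
        simp only [List.mem_singleton]
        obtain ⟨t1, t21, t22⟩ := t
        simp only at h1 h2 ht22 ⊢
        rw [h1, h2, ht22]
      · right
        exact ⟨i, jn, by omega, hcons, hch, h1, h2⟩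

theorem pv_cands_pairwise (ls : List Char) (s : Nat) (dd : PySem.Dict Char Int) :
    (∀ t ∈ pvCands dd (PySem.List.enumerate ls s), (s : Int) ≤ t.2.1) ∧
      (pvCands dd (PySem.List.enumerate ls s)).Pairwise (fun t u => t.2.1 < u.2.1) := by
  induction ls generalizing s dd with
  | nil => simp [PySem.List.enumerate_nil, pvCands]
  | cons c rest ih =>
    rw [PySem.List.enumerate_cons]
    simp only [pvCands]
    have hcast : ((s : Int) + 1) = (((s + 1 : Nat)) : Int) := by push_cast; ring
    rw [hcast]
    obtain ⟨ih1, ih2⟩ := ih (s + 1) (PySem.Dict.insert dd c (s : Int))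
    have hhead : ∀ t ∈ (match PySem.Dict.get? dd c with
        | some prev => [((s : Int) - prev, (s : Int), c)]
        | none => ([] : List (Int × Int × Char))), t.2.1 = (s : Int) := by
      cases hd : PySem.Dict.get? dd c <;> simp
    constructor
    · intro t ht
      rcases List.mem_append.mp ht with h | h
      · rw [hhead t h]
      · have := ih1 t h; push_cast at this ⊢; omega
    · rw [List.pairwise_append]
      refine ⟨?_, ih2, ?_⟩
      · cases hd : PySem.Dict.get? dd c <;> simp
      · intro x hx y hy
        rw [hhead x hx]
        have := ih1 y hy; push_cast at this ⊢; omega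

theorem pv_foldmin_aux (ts : List (Int × Int × Char)) (a tstar : Int × Int × Char)
    (hlt : ∀ u ∈ ts, a.2.1 < u.2.1) (hp : ts.Pairwise (fun t u => t.2.1 < u.2.1))
    (hm : tstar = a ∨ tstar ∈ ts)
    (hmin : ∀ u, (u = a ∨ u ∈ ts) → tstar.1 < u.1 ∨ (tstar.1 = u.1 ∧ tstar.2.1 ≤ u.2.1)) :
    ts.foldl pvOp (some (a.1, String.ofList [a.2.2])) = some (tstar.1, String.ofList [tstar.2.2]) := by
  induction ts generalizing a with
  | nil =>
    rcases hm with rfl | h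
    · rfl
    · simp at h
  | cons u rest ih =>
    rw [List.foldl_cons]
    have hpu := (List.pairwise_cons.mp hp).1
    have hp' := (List.pairwise_cons.mp hp).2
    by_cases h : u.1 < a.1
    · have : pvOp (some (a.1, String.ofList [a.2.2])) u = some (u.1, String.ofList [u.2.2]) := by
        simp [pvOp, h]
      rw [this]
      refine ih u hpu hp' ?_ ?_
      · rcases hm with rfl | hmem
        · rcases hmin u (Or.inr (List.mem_cons_self)) with hlt1 | ⟨heq, _⟩ <;> omega
        · rcases List.mem_cons.mp hmem with rfl | hr
          · exact Or.inl rfl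
          · exact Or.inr hr
      · intro v hv
        rcases hv with rfl | hv
        · exact hmin v (Or.inr List.mem_cons_self)
        · exact hmin v (Or.inr (List.mem_cons_of_mem _ hv))
    · have : pvOp (some (a.1, String.ofList [a.2.2])) u = some (a.1, String.ofList [a.2.2]) := by
        simp [pvOp, h]
      rw [this]
      refine ih a (fun v hv => hlt v (List.mem_cons_of_mem _ hv)) hp' ?_ ?_
      · rcases hm with rfl | hmem
        · exact Or.inl rfl
        · rcases List.mem_cons.mp hmem with rfl | hr
          · exfalso
            rcases hmin a (Or.inl rfl) with h1 | ⟨h1, h2⟩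
            · omega
            · have := hlt tstar List.mem_cons_self; omega
          · exact Or.inr hr
      · intro v hv
        rcases hv with rfl | hv
        · exact hmin v (Or.inl rfl)
        · exact hmin v (Or.inr (List.mem_cons_of_mem _ hv))

theorem pv_foldmin (ts : List (Int × Int × Char)) (tstar : Int × Int × Char)
    (hp : ts.Pairwise (fun t u => t.2.1 < u.2.1)) (hm : tstar ∈ ts)
    (hmin : ∀ u ∈ ts, tstar.1 < u.1 ∨ (tstar.1 = u.1 ∧ tstar.2.1 ≤ u.2.1)) :
    ts.foldl pvOp none = some (tstar.1, String.ofList [tstar.2.2]) := by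
  cases ts with
  | nil => simp at hm
  | cons h rest =>
    rw [List.foldl_cons]
    have : pvOp none h = some (h.1, String.ofList [h.2.2]) := rfl
    rw [this]
    refine pv_foldmin_aux rest h tstar (List.pairwise_cons.mp hp).1 (List.pairwise_cons.mp hp).2 ?_ ?_
    · rcases List.mem_cons.mp hm with rfl | hr
      · exact Or.inl rfl
      · exact Or.inr hr
    · intro u hu
      rcases hu with rfl | hu
      · exact hmin u List.mem_cons_self
      · exact hmin u (List.mem_cons_of_mem _ hu)

-- B's two loops as findSome? over Nat ranges
theorem pv_inner_eq (l : List Char) (d : Int) (is : List Int) :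
    pvAltInner l d is = is.findSome? (fun i =>
      match PySem.List.pyGet? l i with
      | some a => if PySem.List.pyGet? l (i + d) = some a then some (d, String.ofList [a]) else none
      | none => none) := by
  induction is with
  | nil => rfl
  | cons i rest ih =>
    rw [List.findSome?_cons]
    cases hg : PySem.List.pyGet? l i with
    | none => simp only [pvAltInner, hg]; exact ih
    | some a =>
      by_cases hq : PySem.List.pyGet? l (i + d) = some a
      · simp only [pvAltInner, hg, if_pos hq]
      · simp only [pvAltInner, hg, if_neg hq]; exact ih

theorem pv_outer_eq (l : List Char) (ds : List Int) :
    pvAltOuter l ds = ds.findSome? (fun d =>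
      pvAltInner l d (PySem.List.pyRange 0 ((l.length : Int) - d) 1)) := by
  induction ds with
  | nil => rfl
  | cons d rest ih =>
    rw [List.findSome?_cons]
    cases h : pvAltInner l d (PySem.List.pyRange 0 ((l.length : Int) - d) 1) with
    | none => simp only [pvAltOuter, h]; exact ih
    | some r => simp only [pvAltOuter, h]

theorem pv_gn_cast (l : List Char) (k i : Nat) :
    (match PySem.List.pyGet? l ((0 : Int) + (i : Nat)) with
      | some a => if PySem.List.pyGet? l (((0 : Int) + (i : Nat)) + ((1 : Int) + (k : Nat))) = some a
          then some (((1 : Int) + (k : Nat)), String.ofList [a]) else none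
      | none => none) = pvGN l (k + 1) i := by
  have h1 : ((0 : Int) + (i : Nat)) = ((i : Nat) : Int) := by omega
  have h3 : ((1 : Int) + (k : Nat)) = ((k + 1 : Nat) : Int) := by push_cast; omega
  rw [h1, h3, pvGN]
  have h5 : PySem.List.pyGet? l ((i : Nat) : Int) = l[i]? := by simp
  have h4 : PySem.List.pyGet? l (((i : Nat) : Int) + (((k + 1) : Nat) : Int)) = l[i + (k + 1)]? := by
    have hcst : ((i : Nat) : Int) + (((k + 1) : Nat) : Int) = (((i + (k + 1) : Nat)) : Int) := by
      push_cast; ring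
    rw [hcst, PySem.List.pyGet?_natCast]
  rw [h5, h4]

theorem pv_alt_eq (l : List Char) :
    pvAltOuter l (PySem.List.pyRange 1 (l.length : Int) 1) =
      (List.range (l.length - 1)).findSome? (fun k =>
        (List.range (l.length - (k + 1))).findSome? (fun i => pvGN l (k + 1) i)) := by
  rw [pv_outer_eq, PySem.List.pyRange_one, List.findSome?_map]
  have hn : ((l.length : Int) - 1).toNat = l.length - 1 := by omega
  rw [hn]
  congr 1
  funext k
  simp only [Function.comp]
  rw [pv_inner_eq, PySem.List.pyRange_one, List.findSome?_map]
  have hm : ((l.length : Int) - (1 + (k : Nat)) - 0).toNat = l.length - (k + 1) := by omega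
  rw [hm]
  congr 1
  funext i
  simp only [Function.comp]
  exact pv_gn_cast l k i

theorem pv_fs_first {α : Type} (f : Nat → Option α) (m i0 : Nat) (r : α) (hi : i0 < m)
    (h0 : ∀ i < i0, f i = none) (hf : f i0 = some r) :
    (List.range m).findSome? f = some r := by
  have hm : m = i0 + (m - i0) := by omega
  rw [hm, List.range_add, List.findSome?_append]
  have h1 : (List.range i0).findSome? f = none :=
    List.findSome?_eq_none_iff.mpr (fun i hji => h0 i (List.mem_range.mp hji))
  rw [h1]
  obtain ⟨q, hq⟩ : ∃ q, m - i0 = q + 1 := ⟨m - i0 - 1, by omega⟩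
  rw [hq, List.range_succ_eq_map, List.map_cons, List.findSome?_cons]
  simp [hf]

theorem pv_A_eq_fold (text : String) (hne : text.toList ≠ []) :
    min_repeating_character_difference text =
      (pvCands PySem.Dict.empty (PySem.List.enumerate text.toList 0)).foldl pvOp none := by
  obtain ⟨c, ls, hl⟩ : ∃ c ls, text.toList = c :: ls := by
    cases h : text.toList with
    | nil => exact absurd h hne
    | cons c ls => exact ⟨c, ls, rfl⟩
  have hget : PySem.Str.pyGet? text 0 = some c := by
    simp [PySem.Str.pyGet?, hl]
  unfold min_repeating_character_difference
  rw [hget]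
  rw [pv_fold_eq]
  have hcount := pv_count (PySem.List.enumerate text.toList 0) PySem.Dict.empty
    (by rw [PySem.Dict.keys_empty]; exact List.nodup_nil)
  rw [PySem.Dict.keys_empty, PySem.List.length_enumerate] at hcount
  simp only [List.length_nil] at hcount
  by_cases hc : pvCands PySem.Dict.empty (PySem.List.enumerate text.toList 0) = []
  · rw [hc] at hcount ⊢
    simp only [List.length_nil] at hcount
    simp [List.foldl_nil]
  · have hlen : (pvCands PySem.Dict.empty (PySem.List.enumerate text.toList 0)).length ≠ 0 := by
      intro h; exact hc (List.length_eq_zero_iff.mp h)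
    have hkeys : ((pvDictAfter PySem.Dict.empty (PySem.List.enumerate text.toList 0)).keys).length ≠
        text.toList.length := by omega
    dsimp only
    rw [if_pos hkeys]

theorem pv_main (text : String) (hne : text.toList ≠ []) :
    min_repeating_character_difference text = min_repeating_character_difference_alt text := by
  classical
  have hA := pv_A_eq_fold text hne
  have hB : min_repeating_character_difference_alt text =
      (List.range (text.toList.length - 1)).findSome? (fun k =>
        (List.range (text.toList.length - (k + 1))).findSome? (fun i => pvGN text.toList (k + 1) i)) :=
    pv_alt_eq text.toList
  set l := text.toList with hldef
  set n := l.length with hn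
  have hinv0 : pvInvD l PySem.Dict.empty 0 := by
    intro c j
    rw [PySem.Dict.get?_empty]
    constructor
    · intro h; exact absurd h (by simp)
    · rintro ⟨jn, _, hlt, _, _⟩; omega
  have hmem0 := fun t => pv_cands_mem l l 0 PySem.Dict.empty (by simp) hinv0 t
  simp only [Nat.cast_zero] at hmem0
  have hmem : ∀ t, t ∈ pvCands PySem.Dict.empty (PySem.List.enumerate l 0) ↔
      ∃ i jn : Nat, pvCons l i jn ∧
        l[jn]? = some t.2.2 ∧ t.1 = (jn : Int) - (i : Int) ∧ t.2.1 = (jn : Int) := by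
    intro t
    rw [hmem0 t]
    constructor
    · rintro ⟨i, jn, _, h⟩; exact ⟨i, jn, h⟩
    · rintro ⟨i, jn, h⟩; exact ⟨i, jn, Nat.zero_le jn, h⟩
  by_cases hEx : ∃ k, pvP l k
  · -- there is a duplicate
    haveI : DecidablePred (pvP l) := fun k => by unfold pvP; infer_instance
    have hk0 := Nat.find_spec hEx
    set k0 := Nat.find hEx with hk0def
    unfold pvP at hk0
    obtain ⟨iw, hiw1, hiw2, hiw3⟩ := hk0
    have hEx2 : ∃ i, i < n ∧ i + (k0 + 1) < n ∧ l[i]? = l[i + (k0 + 1)]? := ⟨iw, hiw1, hiw2, hiw3⟩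
    have hi0spec := Nat.find_spec hEx2
    set i0 := Nat.find hEx2 with hi0def
    obtain ⟨hi0n, hi0dn, hi0eq⟩ := hi0spec
    obtain ⟨a, ha⟩ : ∃ a, l[i0]? = some a := ⟨l[i0]'hi0n, List.getElem?_eq_getElem hi0n⟩
    have haj : l[i0 + (k0 + 1)]? = some a := by rw [← hi0eq]; exact ha
    have hnoPlt : ∀ k < k0, ¬ pvP l k := fun k hk => Nat.find_min hEx hk
    -- B's value
    have hBval : (List.range (n - 1)).findSome? (fun k =>
        (List.range (n - (k + 1))).findSome? (fun i => pvGN l (k + 1) i)) =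
        some (((k0 + 1 : Nat) : Int), String.ofList [a]) := by
      apply pv_fs_first _ _ k0 _ (by omega)
      · intro k hk
        apply List.findSome?_eq_none_iff.mpr
        intro i hi
        unfold pvGN
        cases hgi : l[i]? with
        | none => rfl
        | some b =>
          dsimp only
          by_cases hq : l[i + (k + 1)]? = some b
          · exact absurd ⟨i, (List.getElem?_eq_some_iff.mp hgi).1,
              (List.getElem?_eq_some_iff.mp hq).1, by rw [hgi, hq]⟩ (hnoPlt k hk)
          · rw [if_neg hq]
      · apply pv_fs_first _ _ i0 _ (by omega)
        · intro i hi
          unfold pvGN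
          cases hgi : l[i]? with
          | none => rfl
          | some b =>
            dsimp only
            by_cases hq : l[i + (k0 + 1)]? = some b
            · exact absurd ⟨(List.getElem?_eq_some_iff.mp hgi).1,
                (List.getElem?_eq_some_iff.mp hq).1, by rw [hgi, hq]⟩ (Nat.find_min hEx2 hi)
            · rw [if_neg hq]
        · unfold pvGN
          rw [ha]
          dsimp only
          rw [if_pos haj]
    -- A's candidate minimal triple
    have htmem : (((k0 + 1 : Nat) : Int), ((i0 + (k0 + 1) : Nat) : Int), a) ∈
        pvCands PySem.Dict.empty (PySem.List.enumerate l 0) := by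
      apply (hmem _).mpr
      refine ⟨i0, i0 + (k0 + 1), ⟨by omega, hi0dn, hi0eq, ?_⟩, haj, by push_cast; ring, rfl⟩
      intro k hk1 hk2 hkc
      rw [← hi0eq] at hkc  -- unused? l[k]? = l[i0+(k0+1)]?
      have hm1 : i0 + (k0 + 1) - k ≥ 1 := by omega
      apply hnoPlt (i0 + (k0 + 1) - k - 1) (by omega)
      refine ⟨k, by omega, ?_, ?_⟩
      · have : k + (i0 + (k0 + 1) - k - 1 + 1) = i0 + (k0 + 1) := by omega
        omega
      · have heqi : k + (i0 + (k0 + 1) - k - 1 + 1) = i0 + (k0 + 1) := by omega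
        rw [heqi, hkc, hi0eq]
    have hminimal : ∀ u ∈ pvCands PySem.Dict.empty (PySem.List.enumerate l 0),
        (((k0 + 1 : Nat) : Int)) < u.1 ∨
          ((((k0 + 1 : Nat) : Int)) = u.1 ∧ (((i0 + (k0 + 1) : Nat) : Int)) ≤ u.2.1) := by
      intro u hu
      obtain ⟨i', jn', ⟨hij', hjl', hchar', hlast'⟩, hch', h1', h2'⟩ := (hmem u).mp hu
      have hP' : pvP l (jn' - i' - 1) := by
        refine ⟨i', by omega, by omega, ?_⟩
        have : i' + (jn' - i' - 1 + 1) = jn' := by omega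
        rw [this]; exact hchar'
      have hk0le : k0 ≤ jn' - i' - 1 := Nat.find_min' hEx hP'
      by_cases heq : jn' - i' = k0 + 1
      · right
        constructor
        · rw [h1']; push_cast; omega
        · have hP2 : i' < n ∧ i' + (k0 + 1) < n ∧ l[i']? = l[i' + (k0 + 1)]? := by
            refine ⟨by omega, by omega, ?_⟩
            have : i' + (k0 + 1) = jn' := by omega
            rw [this]; exact hchar'
          have hle := Nat.find_min' hEx2 hP2
          rw [h2']; push_cast; omega
      · left
        rw [h1']; push_cast; omega
    have hpw := (pv_cands_pairwise l 0 PySem.Dict.empty).2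
    simp only [Nat.cast_zero] at hpw
    have hAval := pv_foldmin _ _ hpw htmem hminimal
    rw [hA, hB, hAval, hBval]
  · -- no duplicate at all
    have hC : pvCands PySem.Dict.empty (PySem.List.enumerate l 0) = [] := by
      rw [List.eq_nil_iff_forall_not_mem]
      intro t ht
      obtain ⟨i, jn, ⟨hij, hjl, hchar, _⟩, _⟩ := (hmem t).mp ht
      apply hEx
      refine ⟨jn - i - 1, i, by omega, by omega, ?_⟩
      have : i + (jn - i - 1 + 1) = jn := by omega
      rw [this]; exact hchar
    rw [hA, hB, hC, List.foldl_nil]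
    symm
    apply List.findSome?_eq_none_iff.mpr
    intro k _
    apply List.findSome?_eq_none_iff.mpr
    intro i _
    unfold pvGN
    cases hgi : l[i]? with
    | none => rfl
    | some b =>
      dsimp only
      by_cases hq : l[i + (k + 1)]? = some b
      · exact absurd ⟨i, (List.getElem?_eq_some_iff.mp hgi).1,
          (List.getElem?_eq_some_iff.mp hq).1, by rw [hgi, hq]⟩ (fun h => hEx ⟨k, h⟩)
      · rw [if_neg hq]

-- ===== VERDICT (by name: the statement is the Claim_ definition above) =====
theorem min_repeating_character_difference_spec : Claim_equal_min_repeating_character_difference := by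
  intro text _ hpre
  unfold Spec_min_repeating_character_difference
  exact pv_main text hpre
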